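-- pv_equiv track=rewrite | github.com/DanielKalicki/s2v_linker | batchers/wiki_links_batch.py | _get_articles_to_emb
-- ===== SOURCE A (Python) =====
-- import copy
--
-- def get_links(title, linkset):
--     try:
--         return linkset[title]['links']
--     except KeyError:
--         return []
--
-- def find_all_links(title, linkset, depth=100):
--     links = set()
--     links.update(get_links(title, linkset))
--     links_length = len(links)
--     for i in range(0, depth):
--         for link in copy.copy(links):
--             links.update(get_links(link, linkset))
--         if len(links) == links_length:
--             break
--         else:
--             links_length = len(links)
--     return links
--
-- def _get_articles_to_emb(initial_articles, linkset):
--     all_articles = set()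
--     for article in initial_articles:
--         if len(get_links(article, linkset)) > 0:
--             all_articles.update([article])
--     for title in copy.copy(all_articles):
--         links = find_all_links(title, linkset, 0)
--         all_articles.update(links)
--     return all_articles
-- ===== SOURCE B (Python) =====
-- def _get_articles_to_emb(initial_articles, linkset):
--     # single pass: collect source articles and their direct links in one loop,
--     # keeping two ordered, duplicate-free accumulators; union them at the end
--     sources = []
--     links = []
--     seen_source = set()
--     seen_link = set()
--     for article in initial_articles:
--         entry = linkset.get(article)
--         ls = entry.get('links', []) if entry is not None else []
--         if ls:
--             if article not in seen_source:
--                 seen_source.add(article)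
--                 sources.append(article)
--             for l in ls:
--                 if l not in seen_link:
--                     seen_link.add(l)
--                     links.append(l)
--     return set(sources + links)
-- ===== Notes on version B (the rewrite author's own statement) =====
-- stated objective: alternative
-- what changed: Replaces A's two staged set passes (filter articles into a set, then iterate a frozen copy of that set calling the find_all_links fixed-point machinery at depth 0) by one fused pass over initial_articles that maintains two ordered accumulators (source articles and their direct links, KeyError logic inlined as dict.get) and unions them once at the end; the BFS loop, copy.copy and the intermediate set snapshot disappear.
import Mathlib
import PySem

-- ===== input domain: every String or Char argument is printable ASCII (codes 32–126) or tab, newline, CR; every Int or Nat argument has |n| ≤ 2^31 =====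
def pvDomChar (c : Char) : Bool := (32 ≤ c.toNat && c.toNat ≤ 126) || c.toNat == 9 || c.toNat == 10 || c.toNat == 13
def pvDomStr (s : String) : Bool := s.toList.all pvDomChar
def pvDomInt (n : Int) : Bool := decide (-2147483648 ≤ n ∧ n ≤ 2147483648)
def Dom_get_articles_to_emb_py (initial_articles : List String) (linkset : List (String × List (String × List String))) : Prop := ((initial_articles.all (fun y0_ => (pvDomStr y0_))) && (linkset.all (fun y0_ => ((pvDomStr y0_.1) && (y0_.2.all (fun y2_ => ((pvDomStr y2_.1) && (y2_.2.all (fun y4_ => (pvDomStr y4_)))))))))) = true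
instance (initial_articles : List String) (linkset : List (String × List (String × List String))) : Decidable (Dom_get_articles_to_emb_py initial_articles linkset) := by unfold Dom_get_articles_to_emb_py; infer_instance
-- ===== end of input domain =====

-- B fuses A's two staged set passes (filter into a set, then expand a frozen snapshot
-- via depth-0 find_all_links) into ONE pass keeping two ordered accumulators
-- (sources, links) that are unioned once at the end (alternative decomposition, same cost).
-- ===== PORT A =====
-- get_links: linkset[title]['links'] with KeyError (either lookup) -> []
def get_links_py (title : String) (linkset : List (String × List (String × List String))) : List String :=
  match (PySem.Dict.mk linkset).get? title with
  | none => []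
  | some e =>
    match (PySem.Dict.mk e).get? "links" with
    | none => []
    | some ls => ls

-- the 'for i in range(0, depth)' loop of find_all_links, with its break
def fal_loop (linkset : List (String × List (String × List String))) :
    List Int → PySem.Set String → Int → PySem.Set String
  | [], links, _ => links
  | _ :: rest, links, links_length =>
    let links' := links.foldl (fun acc link => PySem.Set.update acc (get_links_py link linkset)) links
    if PySem.Set.len links' = links_length then links'
    else fal_loop linkset rest links' (PySem.Set.len links')

def find_all_links_py (title : String) (linkset : List (String × List (String × List String))) (depth : Int) : PySem.Set String :=
  let links := PySem.Set.update PySem.Set.empty (get_links_py title linkset)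
  fal_loop linkset (PySem.List.pyRange 0 depth 1) links (PySem.Set.len links)

def get_articles_to_emb_py (initial_articles : List String) (linkset : List (String × List (String × List String))) : List String :=
  let all_articles : PySem.Set String := initial_articles.foldl
    (fun acc article => if (get_links_py article linkset).length > 0 then PySem.Set.update acc [article] else acc)
    PySem.Set.empty
  all_articles.foldl (fun acc title => PySem.Set.update acc (find_all_links_py title linkset 0)) all_articles

-- ===== PORT B =====
-- Source B: ls = entry.get('links', []) if (entry := linkset.get(article)) is not None else []
def links_of_alt (linkset : List (String × List (String × List String))) (title : String) : List String :=
  match (PySem.Dict.mk linkset).get? title with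
  | none => []
  | some e => (PySem.Dict.mk e).getD "links" []

-- one fused pass: the pair state is (sources, links); the inner 'for l in ls' dedup
-- loop is exactly PySem.Set.update, the guarded append is PySem.Set.add
def get_articles_to_emb_py_alt (initial_articles : List String) (linkset : List (String × List (String × List String))) : List String :=
  let r := initial_articles.foldl
    (fun (st : PySem.Set String × PySem.Set String) article =>
      let ls := links_of_alt linkset article
      if ls.isEmpty then st
      else (PySem.Set.add st.1 article, PySem.Set.update st.2 ls))
    (PySem.Set.empty, PySem.Set.empty)
  PySem.Set.update r.1 r.2

-- ===== PRECONDITION & SPEC =====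
def Spec_get_articles_to_emb_py (initial_articles : List String) (linkset : List (String × List (String × List String))) (out : List String) : Prop := out = get_articles_to_emb_py_alt initial_articles linkset
instance (initial_articles : List String) (linkset : List (String × List (String × List String))) (out : List String) : Decidable (Spec_get_articles_to_emb_py initial_articles linkset out) := by unfold Spec_get_articles_to_emb_py; infer_instance

-- ===== CLAIM (what is proved, stated in full; the proofs are below) =====
def Claim_equal_get_articles_to_emb_py : Prop := ∀ (initial_articles : List String) (linkset : List (String × List (String × List String))), Dom_get_articles_to_emb_py initial_articles linkset → Spec_get_articles_to_emb_py initial_articles linkset (get_articles_to_emb_py initial_articles linkset)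

-- ===== LEMMAS AND PROOFS =====

-- get_links and links_of_alt compute the same list
theorem links_eq (linkset : List (String × List (String × List String))) (t : String) :
    get_links_py t linkset = links_of_alt linkset t := by
  unfold get_links_py links_of_alt
  cases (PySem.Dict.mk linkset).get? t with
  | none => rfl
  | some e =>
    simp only [PySem.Dict.getD_eq_get?_getD]
    cases (PySem.Dict.mk e).get? "links" <;> rfl

-- the filter-into-a-set loop of A is set(filter)
theorem foldl_if_add (linkset : List (String × List (String × List String)))
    (xs : List String) (s : PySem.Set String) :
    xs.foldl (fun acc a => if (get_links_py a linkset).length > 0 then PySem.Set.update acc [a] else acc) s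
      = PySem.Set.update s (xs.filter (fun a => decide ((get_links_py a linkset).length > 0))) := by
  induction xs generalizing s with
  | nil => rfl
  | cons x xs ih =>
    simp only [List.foldl_cons, List.filter_cons]
    by_cases h : (get_links_py x linkset).length > 0
    · rw [if_pos h, PySem.Set.update_cons, PySem.Set.update_nil,
        if_pos (by simpa using h), PySem.Set.update_cons]
      exact ih (PySem.Set.add s x)
    · rw [if_neg h, if_neg (by simpa using h)]
      exact ih s

-- updating with a list all of whose elements are already present is the identity
theorem update_of_subset (s : PySem.Set String) (ys : List String) (h : ∀ y ∈ ys, y ∈ s) :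
    PySem.Set.update s ys = s := by
  rw [PySem.Set.update_eq_append_filter]
  have hnil : List.filter (fun y => !s.contains y) (PySem.Set.ofList ys) = [] := by
    apply List.filter_eq_nil_iff.mpr
    intro y hy
    have hm := h y ((PySem.Set.mem_ofList ys y).mp hy)
    simp [hm]
  rw [hnil, List.append_nil]

-- the update loop over a list equals one update with the flatMap
theorem foldl_update (f : String → List String) (l : List String) (s : PySem.Set String) :
    l.foldl (fun acc t => PySem.Set.update acc (f t)) s = PySem.Set.update s (l.flatMap f) := by
  induction l generalizing s with
  | nil => rfl
  | cons x l ih => simp only [List.foldl_cons, List.flatMap_cons, ih, PySem.Set.update_append]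

-- deduplicating the index list before flatMapping does not change the update
theorem update_flatMap_ofList (f : String → List String) (xs : List String) (s : PySem.Set String) :
    PySem.Set.update s ((PySem.Set.ofList xs).flatMap f) = PySem.Set.update s (xs.flatMap f) := by
  induction xs using List.reverseRecOn generalizing s with
  | nil => rfl
  | append_singleton xs x ih =>
    by_cases hx : x ∈ PySem.Set.ofList xs
    · rw [PySem.Set.ofList_append_singleton, PySem.Set.add_of_mem hx, ih,
        List.flatMap_append, List.flatMap_singleton, PySem.Set.update_append]
      symm
      apply update_of_subset
      intro y hy
      rw [PySem.Set.mem_update]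
      exact Or.inr (List.mem_flatMap.mpr ⟨x, (PySem.Set.mem_ofList xs x).mp hx, hy⟩)
    · rw [PySem.Set.ofList_append_singleton, PySem.Set.add_of_not_mem hx]
      simp only [List.flatMap_append, List.flatMap_singleton, PySem.Set.update_append, ih]

-- update with set(ys) = update with ys
theorem update_ofList (s : PySem.Set String) (ys : List String) :
    PySem.Set.update s (PySem.Set.ofList ys) = PySem.Set.update s ys := by
  rw [PySem.Set.update_eq_append_filter, PySem.Set.update_eq_append_filter,
    PySem.Set.ofList_ofList]

-- with depth 0 the BFS returns just the direct links
theorem find_all_links_zero (t : String) (linkset : List (String × List (String × List String))) :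
    find_all_links_py t linkset 0 = PySem.Set.ofList (get_links_py t linkset) := by
  unfold find_all_links_py
  rw [PySem.List.pyRange_one_eq_nil (by omega)]
  rfl

-- B's fused pair loop, characterised: it accumulates set(filter) and set(flatMap of filter)
theorem pair_foldl (linkset : List (String × List (String × List String)))
    (xs : List String) (S L : PySem.Set String) :
    xs.foldl
      (fun (st : PySem.Set String × PySem.Set String) article =>
        let ls := links_of_alt linkset article
        if ls.isEmpty then st
        else (PySem.Set.add st.1 article, PySem.Set.update st.2 ls))
      (S, L)
    = (PySem.Set.update S (xs.filter (fun a => !(links_of_alt linkset a).isEmpty)),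
       PySem.Set.update L ((xs.filter (fun a => !(links_of_alt linkset a).isEmpty)).flatMap
          (links_of_alt linkset))) := by
  induction xs generalizing S L with
  | nil => rfl
  | cons x xs ih =>
    simp only [List.foldl_cons, List.filter_cons]
    by_cases h : (links_of_alt linkset x).isEmpty
    · simp only [h, if_pos, Bool.not_true, ih]
      rfl
    · simp only [h, Bool.not_false, if_neg, Bool.false_eq_true, not_false_iff, if_true]
      rw [ih]
      simp only [List.flatMap_cons, PySem.Set.update_cons, PySem.Set.update_append]

-- ===== VERDICT (by name: the statement is the Claim_ definition above) =====
theorem get_articles_to_emb_py_spec : Claim_equal_get_articles_to_emb_py := by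
  intro initial_articles linkset _
  unfold Spec_get_articles_to_emb_py get_articles_to_emb_py get_articles_to_emb_py_alt
  have hpred : (fun a => decide ((get_links_py a linkset).length > 0))
      = (fun a => !(links_of_alt linkset a).isEmpty) := by
    funext a
    rw [← links_eq]
    cases get_links_py a linkset <;> simp
  have hfal : (fun (acc : PySem.Set String) (title : String) =>
      PySem.Set.update acc (find_all_links_py title linkset 0))
      = fun acc title => PySem.Set.update acc (links_of_alt linkset title) := by
    funext acc title
    rw [find_all_links_zero, update_ofList, links_eq]
  rw [foldl_if_add, PySem.Set.update_empty, hpred, hfal, foldl_update,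
    update_flatMap_ofList, pair_foldl, PySem.Set.update_empty, PySem.Set.update_empty,
    update_ofList]
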